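-- pv_equiv track=rewrite | github.com/sudenall/fastapi-sentiment | app/main.py | handle_negations
-- ===== SOURCE A (Python) =====
-- def handle_negations(tokens: list[str]) -> list[str]:
--     out = []
--     skip = False
--     for i in range(len(tokens)):
--         if skip:
--             skip = False
--             continue
--         if tokens[i] == "not" and i + 1 < len(tokens):
--             out.append(f"not_{tokens[i+1]}")
--             skip = True
--         else:
--             out.append(tokens[i])
--     return out
-- ===== SOURCE B (Python) =====
-- def handle_negations(tokens: list[str]) -> list[str]:
--     # Run-length strategy: a maximal run of k consecutive "not" tokens merges
--     # pairwise into k//2 copies of "not_not"; an odd leftover "not" merges with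
--     # the token that follows the run (or stays bare at the end of the list).
--     out = []
--     i, n = 0, len(tokens)
--     while i < n:
--         if tokens[i] != "not":
--             out.append(tokens[i])
--             i += 1
--         else:
--             j = i + 1
--             while j < n and tokens[j] == "not":
--                 j += 1
--             k = j - i
--             out += ["not_not"] * (k // 2)
--             if k % 2:
--                 if j < n:
--                     out.append("not_" + tokens[j])
--                     j += 1
--                 else:
--                     out.append("not")
--             i = j
--     return out
-- ===== Notes on version B (the rewrite author's own statement) =====
-- stated objective: alternative
-- what changed: Replaces the per-index scan with a skip flag by run-length arithmetic: each maximal run of k consecutive 'not' tokens is emitted in closed form as k//2 copies of 'not_not' plus an odd leftover merged with the token after the run (or left bare at the end).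
import Mathlib
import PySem

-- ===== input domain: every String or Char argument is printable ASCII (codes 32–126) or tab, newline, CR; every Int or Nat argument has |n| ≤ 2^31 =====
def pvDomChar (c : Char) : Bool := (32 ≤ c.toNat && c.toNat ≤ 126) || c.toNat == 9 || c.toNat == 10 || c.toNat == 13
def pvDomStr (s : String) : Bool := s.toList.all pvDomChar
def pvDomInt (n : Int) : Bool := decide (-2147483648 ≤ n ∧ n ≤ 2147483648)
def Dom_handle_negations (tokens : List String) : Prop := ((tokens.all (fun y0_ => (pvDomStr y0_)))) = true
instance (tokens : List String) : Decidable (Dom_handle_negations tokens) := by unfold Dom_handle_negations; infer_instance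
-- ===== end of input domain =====

-- B replaces A's per-index scan with a skip flag by run-length arithmetic over
-- maximal runs of "not" (k//2 merged pairs plus an odd leftover); same cost.

-- ===== PORT A =====
-- loop body of A: state = (out, skip)
def hnStep (tokens : List String) (st : List String × Bool) (i : Int) : List String × Bool :=
  if st.2 then (st.1, false)
  else if PySem.List.pyGetD tokens i "" = "not" ∧ i + 1 < (tokens.length : Int) then
    (st.1 ++ ["not_" ++ PySem.List.pyGetD tokens (i + 1) ""], true)
  else (st.1 ++ [PySem.List.pyGetD tokens i ""], false)

def handle_negations (tokens : List String) : List String :=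
  ((PySem.List.pyRange 0 (tokens.length : Int) 1).foldl (hnStep tokens) ([], false)).1

-- ===== PORT B =====
-- outer while loop of Source B, as recursion on the remaining suffix of tokens;
-- the inner while counting the run of "not"s is takeWhile/dropWhile on the rest
def handle_negations_alt : List String → List String
  | [] => []
  | t :: rest =>
    if t = "not" then
      List.replicate ((1 + (rest.takeWhile (· == "not")).length) / 2) "not_not" ++
        (if (1 + (rest.takeWhile (· == "not")).length) % 2 = 1 then
          (if (rest.dropWhile (· == "not")).isEmpty then ["not"]
           else ("not_" ++ (rest.dropWhile (· == "not")).headD "") ::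
                 handle_negations_alt (rest.dropWhile (· == "not")).tail)
        else handle_negations_alt (rest.dropWhile (· == "not")))
    else t :: handle_negations_alt rest
termination_by tokens => tokens.length
decreasing_by
  · have h := List.length_dropWhile_le (p := (· == "not")) rest
    have h2 : (rest.dropWhile (· == "not")).tail.length = (rest.dropWhile (· == "not")).length - 1 :=
      List.length_tail
    simp only [List.length_cons]
    omega
  · have h := List.length_dropWhile_le (p := (· == "not")) rest
    simp only [List.length_cons]
    omega
  · simp

-- ===== PRECONDITION & SPEC =====
def Spec_handle_negations (tokens : List String) (out : List String) : Prop := out = handle_negations_alt tokens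
instance (tokens : List String) (out : List String) : Decidable (Spec_handle_negations tokens out) := by unfold Spec_handle_negations; infer_instance

-- ===== CLAIM (what is proved, stated in full; the proofs are below) =====
def Claim_equal_handle_negations : Prop := ∀ (tokens : List String), Dom_handle_negations tokens → Spec_handle_negations tokens (handle_negations tokens)

-- ===== LEMMAS AND PROOFS =====

-- proof-only intermediate form: the naive pairwise recursion
def hnPair : List String → List String
  | [] => []
  | t :: rest =>
    if t = "not" then
      match rest with
      | [] => ["not"]
      | n :: rs => ("not_" ++ n) :: hnPair rs
    else t :: hnPair rest

theorem pair_cons_ne (t : String) (rest : List String) (h : ¬ t = "not") :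
    hnPair (t :: rest) = t :: hnPair rest := by
  rw [hnPair.eq_def]
  simp [h]

-- loop invariant for A: the remaining pass over indices [k, len) with skip = false
-- appends exactly hnPair of the remaining suffix
theorem hn_loop (tokens : List String) (m : Nat) :
    ∀ k, k ≤ tokens.length → tokens.length - k ≤ m → ∀ out : List String,
    (PySem.List.pyRange (k : Int) (tokens.length : Int) 1).foldl (hnStep tokens) (out, false)
      = (out ++ hnPair (tokens.drop k), false) := by
  induction m with
  | zero =>
    intro k hk hm out
    have hk' : k = tokens.length := by omega
    subst hk'
    rw [PySem.List.pyRange_one_eq_nil (by omega)]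
    simp [List.drop_eq_nil_of_le, hnPair]
  | succ m ih =>
    intro k hk hm out
    by_cases hend : k = tokens.length
    · subst hend
      rw [PySem.List.pyRange_one_eq_nil (by omega)]
      simp [List.drop_eq_nil_of_le, hnPair]
    have hklt : k < tokens.length := by omega
    have c1 : ((k : Int) + 1) = ((k + 1 : Nat) : Int) := by push_cast; ring
    have g1 : PySem.List.pyGetD tokens (k : Int) "" = tokens[k] := by
      rw [PySem.List.pyGetD_natCast, List.getD_eq_getElem _ _ hklt]
    have hdrop := List.drop_eq_getElem_cons hklt
    rw [PySem.List.pyRange_one_cons (by exact_mod_cast hklt)]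
    simp only [List.foldl_cons, hnStep, Bool.false_eq_true, if_false, c1]
    by_cases hnot : tokens[k] = "not"
    · by_cases hnext : k + 1 < tokens.length
      · have g2 : PySem.List.pyGetD tokens ((k + 1 : Nat) : Int) "" = tokens[k + 1] := by
          rw [PySem.List.pyGetD_natCast, List.getD_eq_getElem _ _ hnext]
        have hdrop2 : tokens.drop (k + 1) = tokens[k + 1] :: tokens.drop (k + 2) :=
          List.drop_eq_getElem_cons hnext
        rw [if_pos ⟨by rw [g1]; exact hnot, by exact_mod_cast hnext⟩]
        rw [PySem.List.pyRange_one_cons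
          (show ((k + 1 : Nat) : Int) < (tokens.length : Int) by exact_mod_cast hnext)]
        have c2 : (((k + 1 : Nat) : Int) + 1) = ((k + 2 : Nat) : Int) := by push_cast; ring
        simp only [List.foldl_cons, hnStep, reduceIte, c2]
        rw [ih (k + 2) (by omega) (by omega)]
        rw [g2, hdrop, hdrop2, hnot]
        simp [hnPair, -List.getElem_cons_drop]
      · rw [if_neg (fun h => hnext (by exact_mod_cast h.2))]
        rw [ih (k + 1) (by omega) (by omega)]
        have h2 : tokens.drop (k + 1) = [] := List.drop_eq_nil_of_le (by omega)
        rw [g1, hdrop, h2, hnot]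
        simp [hnPair, -List.getElem_cons_drop]
    · rw [if_neg (fun h => hnot (by rw [g1] at h; exact h.1))]
      rw [ih (k + 1) (by omega) (by omega)]
      rw [g1, hdrop, pair_cons_ne _ _ hnot]
      simp

-- two leading "not"s always merge into one "not_not" in front of the run form
theorem run_not_not (rs : List String) :
    handle_negations_alt ("not" :: "not" :: rs) = "not_not" :: handle_negations_alt rs := by
  match rs with
  | [] => simp [handle_negations_alt]
  | x :: xs =>
    by_cases hx : x = "not"
    · subst hx
      simp only [handle_negations_alt, if_true, List.takeWhile_cons, List.dropWhile_cons,
        beq_self_eq_true, List.length_cons]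
      generalize (List.takeWhile (fun x => x == "not") xs).length = m
      have e1 : (1 + (m + 1 + 1)) / 2 = (1 + m) / 2 + 1 := by omega
      have e2 : (1 + (m + 1 + 1)) % 2 = (1 + m) % 2 := by omega
      simp only [e1, e2, List.replicate_succ]
      simp
    · have hb : (x == "not") = false := by simp [hx]
      simp only [handle_negations_alt, if_true, List.takeWhile_cons, List.dropWhile_cons,
        beq_self_eq_true, hb, Bool.false_eq_true, if_false, if_true, List.length_cons,
        List.length_nil]
      simp

-- the pairwise recursion equals the run-length form
theorem pair_eq_run : ∀ tokens : List String, hnPair tokens = handle_negations_alt tokens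
  | [] => by simp [hnPair, handle_negations_alt]
  | t :: rest => by
    by_cases ht : t = "not"
    · subst ht
      match rest with
      | [] => simp [handle_negations_alt, hnPair]
      | n :: rs =>
        by_cases hn : n = "not"
        · subst hn
          rw [run_not_not]
          show hnPair ("not" :: "not" :: rs) = _
          simp only [hnPair, if_true]
          rw [pair_eq_run rs]
          have hs : ("not_" ++ "not" : String) = "not_not" := rfl
          rw [hs]
        · show hnPair ("not" :: n :: rs) = _
          simp only [hnPair, if_true]
          have hb : (n == "not") = false := by simp [hn]
          simp only [handle_negations_alt, if_true, List.takeWhile_cons, List.dropWhile_cons,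
            hb, Bool.false_eq_true, if_false, List.length_nil]
          rw [pair_eq_run rs]
          simp
    · rw [pair_cons_ne _ _ ht]
      simp only [handle_negations_alt]
      rw [pair_eq_run rest]
      simp [ht]
termination_by tokens => tokens.length

-- ===== VERDICT (by name: the statement is the Claim_ definition above) =====
theorem handle_negations_spec : Claim_equal_handle_negations := by
  intro tokens _
  unfold Spec_handle_negations handle_negations
  have := hn_loop tokens tokens.length 0 (by omega) (by omega) []
  simp only [Nat.cast_zero] at this
  rw [this]
  simpa using pair_eq_run tokens
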